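-- pv_equiv track=rewrite | github.com/pr4nshul/CFC-Python-DSA-March | Kartik_Behl/Assignment_4.py | count_subsequences_rec
-- ===== SOURCE A (Python) =====
-- def count_subsequences_rec(unprocess,index=0,count=0,process=""):
--     if index == len(unprocess):
--         count += 1
--         return count
--     ch = unprocess[index]
--     asc_ch = ord(ch)
--     count = count_subsequences_rec(unprocess,index+1,count,process+ch)
--     count = count_subsequences_rec(unprocess,index+1,count, process + str(asc_ch))
--     count = count_subsequences_rec(unprocess, index + 1,count, process)
--     return count
-- ===== SOURCE B (Python) =====
-- def count_subsequences_rec(unprocess, index=0, count=0, process=""):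
--     # The recursion in A has a 3-way branching at each of the remaining
--     # len(unprocess) - index positions and adds 1 at each leaf, so the
--     # result is just count plus 3 to that power.
--     return count + 3 ** (len(unprocess) - index)
-- ===== Notes on version B (the rewrite author's own statement) =====
-- stated objective: simpler
-- what changed: Replaces the exponential 3-way recursion (which only threads a counter through its leaves) with the one-line closed form count + 3**(len(unprocess)-index).
import Mathlib
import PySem

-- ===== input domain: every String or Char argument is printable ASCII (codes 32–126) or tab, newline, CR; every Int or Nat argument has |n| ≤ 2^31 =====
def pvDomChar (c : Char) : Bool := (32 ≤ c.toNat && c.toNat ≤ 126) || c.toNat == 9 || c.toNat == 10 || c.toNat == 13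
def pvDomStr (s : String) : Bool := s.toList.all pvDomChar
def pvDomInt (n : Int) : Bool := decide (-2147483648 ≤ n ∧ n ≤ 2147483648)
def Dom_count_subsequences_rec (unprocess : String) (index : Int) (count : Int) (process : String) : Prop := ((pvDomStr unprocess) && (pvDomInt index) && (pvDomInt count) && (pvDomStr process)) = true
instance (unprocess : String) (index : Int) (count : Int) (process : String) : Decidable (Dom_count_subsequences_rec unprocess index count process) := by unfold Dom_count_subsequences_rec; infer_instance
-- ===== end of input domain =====

-- B replaces A's 3-way recursion by the closed form count + 3^(len-index) (objective: simpler).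


-- ===== PORT A =====
-- Fuel-based transcription of A's recursion; inside Pre_ the fuel (len - index).toNat + 1
-- always suffices, and the `none`/fuel-0 branches (Python's IndexError) are outside Pre_.
def csrGo (unprocess : List Char) (index : Int) (count : Int) (process : List Char) (fuel : Nat) : Int :=
  match fuel with
  | 0 => count
  | fuel + 1 =>
    if index = unprocess.length then count + 1
    else
      match PySem.List.pyGet? unprocess index with
      | none => count   -- IndexError in Python; unreachable inside Pre_
      | some ch =>
        let count1 := csrGo unprocess (index + 1) count (process ++ [ch]) fuel
        let count2 := csrGo unprocess (index + 1) count1 (process ++ (PySem.Int.toStr ch.toNat).toList) fuel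
        csrGo unprocess (index + 1) count2 process fuel

def count_subsequences_rec (unprocess : String) (index : Int) (count : Int) (process : String) : Int :=
  csrGo unprocess.toList index count process.toList (((unprocess.toList.length : Int) - index).toNat + 1)

-- ===== PORT B =====
def count_subsequences_rec_alt (unprocess : String) (index : Int) (count : Int) (process : String) : Int :=
  count + 3 ^ ((unprocess.toList.length : Int) - index).toNat

-- ===== PRECONDITION & SPEC =====
-- Pre_ : exactly the inputs on which the Python A returns (elsewhere unprocess[index] raises IndexError).
def Pre_count_subsequences_rec (unprocess : String) (index : Int) (count : Int) (process : String) : Prop :=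
  -(unprocess.toList.length : Int) ≤ index ∧ index ≤ (unprocess.toList.length : Int)
instance (unprocess : String) (index : Int) (count : Int) (process : String) : Decidable (Pre_count_subsequences_rec unprocess index count process) := by unfold Pre_count_subsequences_rec; infer_instance

def pvWitness_count_subsequences_rec : String × Int × Int × String := ("ab", 0, 0, "")

def Spec_count_subsequences_rec (unprocess : String) (index : Int) (count : Int) (process : String) (out : Int) : Prop := out = count_subsequences_rec_alt unprocess index count process
instance (unprocess : String) (index : Int) (count : Int) (process : String) (out : Int) : Decidable (Spec_count_subsequences_rec unprocess index count process out) := by unfold Spec_count_subsequences_rec; infer_instance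

-- ===== CLAIM (what is proved, stated in full; the proofs are below) =====
def Claim_equal_count_subsequences_rec : Prop := ∀ (unprocess : String) (index : Int) (count : Int) (process : String), Dom_count_subsequences_rec unprocess index count process → Pre_count_subsequences_rec unprocess index count process → Spec_count_subsequences_rec unprocess index count process (count_subsequences_rec unprocess index count process)

-- ===== LEMMAS AND PROOFS =====
-- Invariant of A's recursion: with enough fuel and an in-range index, csrGo adds 3^(len-index).
theorem csrGo_closed (u : List Char) : ∀ (fuel : Nat) (index count : Int) (process : List Char),
    ((u.length : Int) - index).toNat < fuel →
    -(u.length : Int) ≤ index → index ≤ (u.length : Int) →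
    csrGo u index count process fuel = count + 3 ^ ((u.length : Int) - index).toNat := by
  intro fuel
  induction fuel with
  | zero => intro index count process h _ _; omega
  | succ f ih =>
    intro index count process hf hlo hhi
    by_cases he : index = (u.length : Int)
    · subst he
      simp [csrGo]
    · have hlt : index < (u.length : Int) := lt_of_le_of_ne hhi he
      have hin : PySem.Raise.InRange u.length index := ⟨hlo, hlt⟩
      obtain ⟨ch, hch⟩ : ∃ ch, PySem.List.pyGet? u index = some ch := by
        cases h : PySem.List.pyGet? u index with
        | none => exact absurd hin (Iff.mp (PySem.List.pyGet?_eq_none_iff u index) h)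
        | some ch => exact ⟨ch, rfl⟩
      have hfuel : ((u.length : Int) - (index + 1)).toNat < f := by omega
      have hlo' : -(u.length : Int) ≤ index + 1 := by omega
      have hhi' : index + 1 ≤ (u.length : Int) := by omega
      have hpow : ((u.length : Int) - index).toNat = ((u.length : Int) - (index + 1)).toNat + 1 := by omega
      simp only [csrGo, if_neg he, hch]
      rw [ih _ _ _ hfuel hlo' hhi', ih _ _ _ hfuel hlo' hhi', ih _ _ _ hfuel hlo' hhi', hpow,
        pow_succ]
      ring

-- ===== VERDICT (by name: the statement is the Claim_ definition above) =====
theorem count_subsequences_rec_spec : Claim_equal_count_subsequences_rec := by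
  intro u index count p _ hpre
  unfold Spec_count_subsequences_rec count_subsequences_rec count_subsequences_rec_alt
  exact csrGo_closed u.toList _ index count p.toList (by omega) hpre.1 hpre.2
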